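-- pv_equiv track=rewrite | github.com/kagrawal1208/ENG-EC-441 | Lecture17-ipv4-ipv6-nat-icmp/ipv4_ipv6_nat_lab.py | fragment_datagram
-- ===== SOURCE A (Python) =====
-- def fragment_datagram(total_length: int, mtu: int, ip_header: int = 20):
--     """
--     Fragment a datagram of total_length bytes into fragments fitting mtu.
--     Returns list of fragment dicts.
--     """
--     payload_total = total_length - ip_header
--     max_payload_per_frag = ((mtu - ip_header) // 8) * 8   # must be multiple of 8
--
--     fragments = []
--     offset = 0   # in bytes
--     remaining = payload_total
--
--     while remaining > 0:
--         payload_size = min(max_payload_per_frag, remaining)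
--         is_last = (payload_size == remaining)
--         fragments.append({
--             "total_length": payload_size + ip_header,
--             "mf_flag": 0 if is_last else 1,
--             "offset_8units": offset // 8,
--             "payload_start": offset,
--             "payload_end": offset + payload_size - 1,
--             "payload_size": payload_size,
--         })
--         offset += payload_size
--         remaining -= payload_size
--
--     return fragments
-- ===== SOURCE B (Python) =====
-- def fragment_datagram(total_length: int, mtu: int, ip_header: int = 20):
--     payload_total = total_length - ip_header
--     max_payload_per_frag = ((mtu - ip_header) // 8) * 8   # must be multiple of 8
--     if payload_total <= 0 or max_payload_per_frag <= 0:
--         return []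
--     num_fragments = (payload_total + max_payload_per_frag - 1) // max_payload_per_frag
--     result = []
--     for i in range(num_fragments):
--         offset = i * max_payload_per_frag
--         payload_size = min(max_payload_per_frag, payload_total - offset)
--         result.append({
--             "total_length": payload_size + ip_header,
--             "mf_flag": 0 if i == num_fragments - 1 else 1,
--             "offset_8units": offset // 8,
--             "payload_start": offset,
--             "payload_end": offset + payload_size - 1,
--             "payload_size": payload_size,
--         })
--     return result
-- ===== Notes on version B (the rewrite author's own statement) =====
-- stated objective: alternative
-- what changed: Replaces A's while-loop that threads offset/remaining accumulators with a count-first indexed pass: the fragment count is computed up front by integer ceiling division and each fragment is built directly from its index.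
import Mathlib
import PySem

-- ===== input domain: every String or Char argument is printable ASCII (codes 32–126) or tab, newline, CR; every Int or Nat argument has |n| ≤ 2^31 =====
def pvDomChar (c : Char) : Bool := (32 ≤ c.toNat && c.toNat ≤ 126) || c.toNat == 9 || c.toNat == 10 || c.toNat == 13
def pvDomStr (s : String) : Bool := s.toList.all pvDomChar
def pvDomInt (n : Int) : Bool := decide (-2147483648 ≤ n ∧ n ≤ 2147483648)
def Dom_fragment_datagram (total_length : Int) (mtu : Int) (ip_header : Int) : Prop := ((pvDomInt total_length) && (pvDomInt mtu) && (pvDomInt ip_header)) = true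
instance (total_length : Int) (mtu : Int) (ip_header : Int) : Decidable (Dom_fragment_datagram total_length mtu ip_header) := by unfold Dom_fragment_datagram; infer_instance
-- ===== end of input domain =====

-- B replaces A's offset/remaining while-loop with a count-first indexed pass (ceil division,
-- then one fragment per index); same output, same cost ("alternative").

-- ===== PORT A =====
-- A's while loop, one recursive call per iteration over the same (offset, remaining) state.
-- The fuel is only a termination bound (payload_total, enough since each iteration consumes
-- at least one payload byte whenever the loop terminates in Python, i.e. inside Pre_).
def pyFragLoopA (ih m : Int) : Nat → Int → Int → List (List (String × Int))
  | 0, _, _ => []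
  | fuel+1, offset, remaining =>
    if remaining > 0 then
      let ps := min m remaining
      let is_last := ps == remaining
      [("total_length", ps + ih),
       ("mf_flag", if is_last then (0:Int) else 1),
       ("offset_8units", PySem.Int.floordiv offset 8),
       ("payload_start", offset),
       ("payload_end", offset + ps - 1),
       ("payload_size", ps)]
      :: pyFragLoopA ih m fuel (offset + ps) (remaining - ps)
    else []

def fragment_datagram (total_length : Int) (mtu : Int) (ip_header : Int) : List (List (String × Int)) :=
  let payload_total := total_length - ip_header
  let max_payload_per_frag := (PySem.Int.floordiv (mtu - ip_header) 8) * 8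
  pyFragLoopA ip_header max_payload_per_frag payload_total.toNat 0 payload_total

-- ===== PORT B =====
def fragment_datagram_alt (total_length : Int) (mtu : Int) (ip_header : Int) : List (List (String × Int)) :=
  let payload_total := total_length - ip_header
  let max_payload_per_frag := (PySem.Int.floordiv (mtu - ip_header) 8) * 8
  if payload_total ≤ 0 ∨ max_payload_per_frag ≤ 0 then []
  else
    let n := (PySem.Int.floordiv (payload_total + max_payload_per_frag - 1) max_payload_per_frag).toNat
    (List.range n).map (fun (i : Nat) =>
      let offset := (i : Int) * max_payload_per_frag
      let ps := min max_payload_per_frag (payload_total - offset)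
      [("total_length", ps + ip_header),
       ("mf_flag", if i == n - 1 then (0:Int) else 1),
       ("offset_8units", PySem.Int.floordiv offset 8),
       ("payload_start", offset),
       ("payload_end", offset + ps - 1),
       ("payload_size", ps)])

-- ===== PRECONDITION & SPEC =====
-- Pre_ excludes exactly the inputs on which A LOOPS FOREVER: a positive payload with a
-- non-positive per-fragment capacity ((mtu - ip_header) // 8 * 8 ≤ 0) never shrinks `remaining`.
def Pre_fragment_datagram (total_length : Int) (mtu : Int) (ip_header : Int) : Prop :=
  total_length - ip_header ≤ 0 ∨ 0 < (PySem.Int.floordiv (mtu - ip_header) 8) * 8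
instance (total_length : Int) (mtu : Int) (ip_header : Int) : Decidable (Pre_fragment_datagram total_length mtu ip_header) := by unfold Pre_fragment_datagram; infer_instance

def pvWitness_fragment_datagram : Int × Int × Int := (100, 60, 20)

def Spec_fragment_datagram (total_length : Int) (mtu : Int) (ip_header : Int) (out : List (List (String × Int))) : Prop := out = fragment_datagram_alt total_length mtu ip_header
instance (total_length : Int) (mtu : Int) (ip_header : Int) (out : List (List (String × Int))) : Decidable (Spec_fragment_datagram total_length mtu ip_header out) := by unfold Spec_fragment_datagram; infer_instance

-- ===== CLAIM (what is proved, stated in full; the proofs are below) =====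
def Claim_equal_fragment_datagram : Prop := ∀ (total_length : Int) (mtu : Int) (ip_header : Int), Dom_fragment_datagram total_length mtu ip_header → Pre_fragment_datagram total_length mtu ip_header → Spec_fragment_datagram total_length mtu ip_header (fragment_datagram total_length mtu ip_header)

-- ===== LEMMAS AND PROOFS =====

-- entry builder used only in the proofs, to state the loop invariant compactly
def pvEntry (ih offset ps : Int) (mf : Int) : List (String × Int) :=
  [("total_length", ps + ih),
   ("mf_flag", mf),
   ("offset_8units", PySem.Int.floordiv offset 8),
   ("payload_start", offset),
   ("payload_end", offset + ps - 1),
   ("payload_size", ps)]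

lemma pyFragLoopA_nonpos (ih m : Int) (fuel : Nat) (off rem : Int) (h : rem ≤ 0) :
    pyFragLoopA ih m fuel off rem = [] := by
  cases fuel with
  | zero => rfl
  | succ f => simp [pyFragLoopA]; omega

lemma pyFragLoopA_pos (ih m : Int) (f : Nat) (off rem : Int) (h : 0 < rem) :
    pyFragLoopA ih m (f + 1) off rem =
      pvEntry ih off (min m rem) (if min m rem == rem then (0:Int) else 1)
        :: pyFragLoopA ih m f (off + min m rem) (rem - min m rem) := by
  simp [pyFragLoopA, pvEntry, h]

lemma loop_eq (ih m : Int) (hm : 0 < m) :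
    ∀ (n fuel : Nat) (off rem : Int),
      rem ≤ (n : Int) * m → ((n : Int) - 1) * m < rem → n ≤ fuel →
      pyFragLoopA ih m fuel off rem =
        (List.range n).map (fun (i : Nat) =>
          pvEntry ih (off + (i : Int) * m) (min m (rem - (i : Int) * m))
            (if i == n - 1 then (0:Int) else 1)) := by
  intro n
  induction n with
  | zero =>
      intro fuel off rem hub _ _
      simp only [Nat.cast_zero, zero_mul] at hub
      simp [pyFragLoopA_nonpos ih m fuel off rem hub]
  | succ k IH =>
      intro fuel off rem hub hlb hf
      obtain ⟨f, rfl⟩ : ∃ f, fuel = f + 1 := ⟨fuel - 1, by omega⟩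
      push_cast at hub hlb
      rw [show ((k:Int) + 1 - 1) * m = (k:Int) * m from by ring] at hlb
      rw [show ((k:Int) + 1) * m = (k:Int) * m + m from by ring] at hub
      have hkm : (0:Int) ≤ (k : Int) * m := by positivity
      have hrem : 0 < rem := lt_of_le_of_lt hkm hlb
      rw [pyFragLoopA_pos ih m f off rem hrem]
      cases k with
      | zero =>
          simp only [Nat.cast_zero, zero_mul, zero_add] at hub hlb
          have hps : min m rem = rem := min_eq_right hub
          rw [hps, pyFragLoopA_nonpos ih m f (off + rem) (rem - rem) (by omega)]
          simp [pvEntry, hps]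
      | succ j =>
          have hj1 : (1:Int) ≤ (j:Int) + 1 := by omega
          have hmle : m ≤ ((j:Int) + 1) * m := by nlinarith
          have hjm : ((j:Int) + 1) * m = ((j + 1 : Nat) : Int) * m := by push_cast; ring
          have hlb2 : ((j:Int) + 1) * m < rem := by rw [hjm]; exact hlb
          have hmlt : m < rem := lt_of_le_of_lt hmle hlb2
          have hps : min m rem = m := min_eq_left hmlt.le
          rw [hps]
          have hub' : rem - m ≤ ((j + 1 : Nat) : Int) * m := by rw [← hjm]; push_cast at hub; linarith
          have hlb' : (((j + 1 : Nat) : Int) - 1) * m < rem - m := by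
            rw [show (((j + 1 : Nat) : Int) - 1) * m = ((j:Int) + 1) * m - m from by push_cast; ring]
            linarith
          rw [IH f (off + m) (rem - m) hub' hlb' (by omega)]
          conv_rhs => rw [List.range_succ_eq_map, List.map_cons, List.map_map]
          have hmf : (m == rem) = false := by simpa using (ne_of_lt hmlt)
          congr 1
          · simp [pvEntry, hps, hmf]
          · apply List.map_congr_left
            intro i _
            simp only [Function.comp_apply, Nat.succ_eq_add_one]
            have c1 : off + m + (i : Int) * m = off + ((i + 1 : Nat) : Int) * m := by push_cast; ring
            have c2 : rem - m - (i : Int) * m = rem - ((i + 1 : Nat) : Int) * m := by push_cast; ring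
            have c3 : (i == j + 1 - 1) = (i + 1 == j + 1 + 1 - 1) := by simp
            rw [c1, c2, c3]

lemma ceil_bounds (p m : Int) (hp : 0 < p) (hm : 0 < m) :
    let q := PySem.Int.floordiv (p + m - 1) m
    p ≤ q * m ∧ (q - 1) * m < p ∧ 1 ≤ q ∧ q ≤ p := by
  intro q
  have h := (PySem.Int.floordiv_eq_iff_of_pos (a := p + m - 1) (b := m) (q := q) hm).mp rfl
  obtain ⟨h1, h2⟩ := h
  have hub : p ≤ q * m := by nlinarith
  have hlb : (q - 1) * m < p := by nlinarith
  have hq1 : 1 ≤ q := by nlinarith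
  have hqp : q ≤ p := by nlinarith
  exact ⟨hub, hlb, hq1, hqp⟩

-- ===== VERDICT (by name: the statement is the Claim_ definition above) =====
theorem fragment_datagram_spec : Claim_equal_fragment_datagram := by
  intro tl mtu ih _ hpre
  unfold Spec_fragment_datagram fragment_datagram fragment_datagram_alt
  set p := tl - ih with hp
  set m := (PySem.Int.floordiv (mtu - ih) 8) * 8 with hmdef
  by_cases hple : p ≤ 0
  · rw [pyFragLoopA_nonpos ih m p.toNat 0 p hple, if_pos (Or.inl hple)]
  · have hppos : 0 < p := by omega
    have hm : 0 < m := by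
      rcases hpre with h | h
      · omega
      · exact h
    rw [if_neg (by omega)]
    obtain ⟨hub, hlb, hq1, hqp⟩ := ceil_bounds p m hppos hm
    set q := PySem.Int.floordiv (p + m - 1) m with hq
    have hcast : ((q.toNat : Int)) = q := Int.toNat_of_nonneg (by omega)
    rw [loop_eq ih m hm q.toNat p.toNat 0 p (by rw [hcast]; exact hub)
        (by rw [hcast]; exact hlb) (by omega)]
    apply List.map_congr_left
    intro i _
    simp [pvEntry]
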